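-- pv_equiv track=rewrite | github.com/c235gsy/Sustech_Data-Structure-and-Algorithm-Analysis | lab/lab13/Q1.py | adjacency_matrix_to_adjacency_lists_and_degree
-- ===== SOURCE A (Python) =====
-- def adjacency_matrix_to_adjacency_lists_and_degree(matrix):
--     n = len(matrix)
--     degrees = [0]*n
--     adlist = [[] for m in range(n)]
--     for i in range(n):
--         for j in range(n):
--             if matrix[i][j] == 1:
--                 degrees[i] += 1
--                 degrees[j] += 1
--                 adlist[i].append(j)
--     return adlist, degrees
-- ===== SOURCE B (Python) =====
-- def adjacency_matrix_to_adjacency_lists_and_degree(matrix):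
--     n = len(matrix)
--     adlist = [[j for j in range(n) if matrix[i][j] == 1] for i in range(n)]
--     degrees = [len(adlist[i]) + sum(1 for k in range(n) if matrix[k][i] == 1)
--                for i in range(n)]
--     return adlist, degrees
-- ===== Notes on version B (the rewrite author's own statement) =====
-- stated objective: alternative
-- what changed: Replaces the single interleaved nested loop that mutates degrees and adjacency lists together by two separate comprehensions: a row pass building the adjacency lists, then a per-vertex degree pass combining out-degree (list length) with an independent column count.
import Mathlib
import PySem

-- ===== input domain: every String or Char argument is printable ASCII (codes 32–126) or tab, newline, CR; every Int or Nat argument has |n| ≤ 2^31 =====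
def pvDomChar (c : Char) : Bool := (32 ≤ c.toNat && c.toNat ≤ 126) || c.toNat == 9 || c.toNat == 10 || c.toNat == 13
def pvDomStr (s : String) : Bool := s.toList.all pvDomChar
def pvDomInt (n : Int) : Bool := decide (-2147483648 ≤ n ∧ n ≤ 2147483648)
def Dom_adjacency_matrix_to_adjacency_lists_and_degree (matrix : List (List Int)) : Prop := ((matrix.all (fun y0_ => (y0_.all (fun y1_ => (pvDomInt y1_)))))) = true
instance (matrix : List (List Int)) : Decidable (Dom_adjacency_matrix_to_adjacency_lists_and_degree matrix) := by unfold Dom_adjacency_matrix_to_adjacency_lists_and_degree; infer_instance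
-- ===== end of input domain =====

-- B replaces A's single interleaved nested loop (mutating degrees and adjacency lists together)
-- by two separate passes: a row pass building the adjacency lists, then a per-vertex degree pass
-- combining out-degree (list length) with an independent column count. Objective: alternative.

-- ===== PORT A =====
def adjacency_matrix_to_adjacency_lists_and_degree (matrix : List (List Int)) : List (List Int) × List Int :=
  let n := matrix.length
  let degrees : List Int := List.replicate n 0
  let adlist : List (List Int) := (List.range n).map (fun _ => ([] : List Int))
  (List.range n).foldl (fun st i =>
    (List.range n).foldl (fun st j =>
      if (matrix.getD i []).getD j 0 == 1 then
        (st.1.modify i (fun l => l ++ [Int.ofNat j]),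
         (st.2.modify i (fun d => d + 1)).modify j (fun d => d + 1))
      else st) st) (adlist, degrees)

-- ===== PORT B =====
def adjacency_matrix_to_adjacency_lists_and_degree_alt (matrix : List (List Int)) : List (List Int) × List Int :=
  let n := matrix.length
  let adlist : List (List Int) :=
    (List.range n).map (fun i =>
      ((List.range n).filter (fun j => (matrix.getD i []).getD j 0 == 1)).map (fun j => Int.ofNat j))
  let degrees : List Int :=
    (List.range n).map (fun i =>
      ((adlist.getD i []).length : Int)
        + (((List.range n).filter (fun k => (matrix.getD k []).getD i 0 == 1)).length : Int))
  (adlist, degrees)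

-- ===== PRECONDITION & SPEC =====
-- Pre_ excludes ragged matrices (a row shorter than the matrix), on which Python A raises IndexError.
def Pre_adjacency_matrix_to_adjacency_lists_and_degree (matrix : List (List Int)) : Prop :=
  ∀ row ∈ matrix, matrix.length ≤ row.length
instance (matrix : List (List Int)) : Decidable (Pre_adjacency_matrix_to_adjacency_lists_and_degree matrix) := by unfold Pre_adjacency_matrix_to_adjacency_lists_and_degree; infer_instance

def pvWitness_adjacency_matrix_to_adjacency_lists_and_degree : List (List Int) := [[0, 1], [1, 0]]

def Spec_adjacency_matrix_to_adjacency_lists_and_degree (matrix : List (List Int)) (out : List (List Int) × List Int) : Prop := out = adjacency_matrix_to_adjacency_lists_and_degree_alt matrix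
instance (matrix : List (List Int)) (out : List (List Int) × List Int) : Decidable (Spec_adjacency_matrix_to_adjacency_lists_and_degree matrix out) := by unfold Spec_adjacency_matrix_to_adjacency_lists_and_degree; infer_instance

-- ===== CLAIM (what is proved, stated in full; the proofs are below) =====
def Claim_equal_adjacency_matrix_to_adjacency_lists_and_degree : Prop := ∀ (matrix : List (List Int)), Dom_adjacency_matrix_to_adjacency_lists_and_degree matrix → Pre_adjacency_matrix_to_adjacency_lists_and_degree matrix → Spec_adjacency_matrix_to_adjacency_lists_and_degree matrix (adjacency_matrix_to_adjacency_lists_and_degree matrix)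

-- ===== LEMMAS AND PROOFS =====

-- the (i,j) entry test both ports use
def pvBit (matrix : List (List Int)) (i j : Nat) : Bool := (matrix.getD i []).getD j 0 == 1

-- the two components of A's inner-loop step
def pvStepAL (matrix : List (List Int)) (i : Nat) (al : List (List Int)) (j : Nat) : List (List Int) :=
  if pvBit matrix i j then al.modify i (fun l => l ++ [Int.ofNat j]) else al
def pvStepDG (matrix : List (List Int)) (i : Nat) (dg : List Int) (j : Nat) : List Int :=
  if pvBit matrix i j then (dg.modify i (fun d => d + 1)).modify j (fun d => d + 1) else dg

lemma modify_modify {α : Type} (l : List α) (i : Nat) (f g : α → α) :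
    (l.modify i f).modify i g = l.modify i (fun x => g (f x)) := by
  apply List.ext_getElem?
  intro k
  rcases hlk : l[k]? with _ | a <;>
    simp [List.getElem?_modify, hlk] <;> by_cases h : i = k <;> simp [h]

-- A's inner loop splits into its two components
lemma inner_split (matrix : List (List Int)) (i : Nat) :
    ∀ (js : List Nat) (al : List (List Int)) (dg : List Int),
      js.foldl (fun st j =>
        if (matrix.getD i []).getD j 0 == 1 then
          (st.1.modify i (fun l => l ++ [Int.ofNat j]),
           (st.2.modify i (fun d => d + 1)).modify j (fun d => d + 1))
        else st) (al, dg)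
      = (js.foldl (pvStepAL matrix i) al, js.foldl (pvStepDG matrix i) dg) := by
  intro js
  induction js with
  | nil => intro al dg; rfl
  | cons j js ih =>
      intro al dg
      simp only [List.foldl_cons, pvStepAL, pvStepDG, pvBit]
      by_cases h : ((matrix.getD i []).getD j 0 == 1) = true
      · rw [if_pos h, if_pos h, if_pos h, ih]
      · rw [if_neg h, if_neg h, if_neg h, ih]

-- the whole of A splits into an adjacency-list fold and a degree fold
lemma outer_split (matrix : List (List Int)) (n : Nat) :
    ∀ (is : List Nat) (al : List (List Int)) (dg : List Int),
      is.foldl (fun st i =>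
        (List.range n).foldl (fun st j =>
          if (matrix.getD i []).getD j 0 == 1 then
            (st.1.modify i (fun l => l ++ [Int.ofNat j]),
             (st.2.modify i (fun d => d + 1)).modify j (fun d => d + 1))
          else st) st) (al, dg)
      = (is.foldl (fun al i => (List.range n).foldl (pvStepAL matrix i) al) al,
         is.foldl (fun dg i => (List.range n).foldl (pvStepDG matrix i) dg) dg) := by
  intro is
  induction is with
  | nil => intro al dg; rfl
  | cons i is ih => intro al dg; rw [List.foldl_cons, inner_split, ih]; rfl

-- the adjacency row built for vertex i
def pvRowls (matrix : List (List Int)) (n i : Nat) : List Int :=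
  ((List.range n).filter (pvBit matrix i)).map (fun j => Int.ofNat j)

lemma inner_al (matrix : List (List Int)) (i : Nat) :
    ∀ (js : List Nat) (al : List (List Int)),
      js.foldl (pvStepAL matrix i) al
        = al.modify i (fun l => l ++ (js.filter (pvBit matrix i)).map (fun j => Int.ofNat j)) := by
  intro js
  induction js with
  | nil =>
      intro al
      have hid : (fun l : List Int =>
          l ++ (List.filter (pvBit matrix i) []).map (fun j => Int.ofNat j)) = id := by
        funext l; simp
      rw [List.foldl_nil, hid, List.modify_id]
  | cons j js ih =>
      intro al
      by_cases h : pvBit matrix i j <;>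
        simp [pvStepAL, h, ih, modify_modify, List.filter_cons]

lemma outer_al_getElem? (matrix : List (List Int)) (n : Nat) :
    ∀ (is : List Nat), is.Nodup → ∀ (al : List (List Int)) (k : Nat),
      (is.foldl (fun al i => al.modify i (fun l => l ++ pvRowls matrix n i)) al)[k]?
        = if k ∈ is then al[k]?.map (fun l => l ++ pvRowls matrix n k) else al[k]? := by
  intro is
  induction is with
  | nil => intro _ al k; simp
  | cons i is ih =>
      intro hnd al k
      rcases List.nodup_cons.mp hnd with ⟨hni, hnd'⟩
      simp only [List.foldl_cons]
      rw [ih hnd']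
      by_cases hk : k = i
      · subst hk
        rw [if_neg hni, List.getElem?_modify]
        simp only [List.mem_cons, true_or, if_pos]
        rcases halk : al[k]? with _ | a <;> simp [halk]
      · have h2 : (al.modify i (fun l => l ++ pvRowls matrix n i))[k]? = al[k]? := by
          rw [List.getElem?_modify]
          rcases halk : al[k]? with _ | a <;>
            simp [halk, show ¬ i = k from fun hh => hk hh.symm]
        rw [h2]
        simp [List.mem_cons, hk]

lemma inner_dg_getElem? (matrix : List (List Int)) (i : Nat) :
    ∀ (js : List Nat) (dg : List Int) (k : Nat),
      (js.foldl (pvStepDG matrix i) dg)[k]?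
        = dg[k]?.map (fun x => x
            + (if k = i then ((js.countP (pvBit matrix i) : Int)) else 0)
            + ((js.countP (fun j => pvBit matrix i j && j == k) : Int))) := by
  intro js
  induction js with
  | nil =>
      intro dg k
      rcases h : dg[k]? with _ | a <;> simp [h]
  | cons j js ih =>
      intro dg k
      by_cases h : pvBit matrix i j
      · simp only [List.foldl_cons, pvStepDG, h, if_true]
        rw [ih]
        simp only [List.getElem?_modify, List.countP_cons, h]
        rcases hk : dg[k]? with _ | a
        · simp [hk]
        · simp only [hk, Option.map_some]
          by_cases h1 : i = k <;> by_cases h2 : j = k <;>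
            simp [h1, h2, beq_iff_eq] <;> push_cast <;> ring_nf <;> omega
      · simp only [List.foldl_cons, pvStepDG, h, if_false]
        rw [ih]
        simp [List.countP_cons, h]

-- contribution of one outer iteration i to degrees[k]
def pvContrib (matrix : List (List Int)) (n i k : Nat) : Int :=
  (if k = i then (((List.range n).countP (pvBit matrix i) : Int)) else 0)
    + (((List.range n).countP (fun j => pvBit matrix i j && j == k) : Int))

lemma outer_dg_getElem? (matrix : List (List Int)) (n : Nat) :
    ∀ (is : List Nat) (dg : List Int) (k : Nat),
      (is.foldl (fun dg i => (List.range n).foldl (pvStepDG matrix i) dg) dg)[k]?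
        = dg[k]?.map (fun x => x + (is.map (fun i => pvContrib matrix n i k)).sum) := by
  intro is
  induction is with
  | nil =>
      intro dg k
      rcases h : dg[k]? with _ | a <;> simp [h]
  | cons i is ih =>
      intro dg k
      simp only [List.foldl_cons]
      rw [ih, inner_dg_getElem?]
      rcases h : dg[k]? with _ | a <;> simp [h, pvContrib, List.map_cons, List.sum_cons] <;> ring

lemma countP_eq_indicator (p : Nat → Bool) :
    ∀ (is : List Nat) (k : Nat), is.Nodup → k ∈ is →
      is.countP (fun j => p j && j == k) = if p k then 1 else 0 := by
  intro is
  induction is with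
  | nil => intro k _ hk; simp at hk
  | cons i is ih =>
      intro k hnd hk
      rcases List.nodup_cons.mp hnd with ⟨hni, hnd'⟩
      have hz : ∀ js : List Nat, k ∉ js → js.countP (fun j => p j && j == k) = 0 := by
        intro js hkn
        rw [List.countP_eq_zero]
        intro j hj
        simp only [Bool.and_eq_true, beq_iff_eq]
        rintro ⟨_, rfl⟩; exact hkn hj
      rcases List.mem_cons.mp hk with hk | hk
      · subst hk
        rw [List.countP_cons, hz is hni]
        by_cases h : p k <;> simp [h]
      · rw [List.countP_cons]
        have hik : ¬ (i == k) = true := by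
          simp only [beq_iff_eq]; rintro rfl; exact hni hk
        simp only [Bool.and_eq_true, hik, and_false, if_false]
        simpa using ih k hnd' hk

lemma sum_if_zero (F : Nat → Int) (p : Nat → Bool) (k : Nat) :
    ∀ is : List Nat, k ∉ is →
      (is.map (fun i => (if k = i then F i else 0) + (if p i then (1 : Int) else 0))).sum
        = (is.countP p : Int) := by
  intro is
  induction is with
  | nil => intro _; simp
  | cons i is ih =>
      intro hk
      have hki : k ≠ i := fun h => hk (h ▸ List.mem_cons_self)
      have hk' : k ∉ is := fun h => hk (List.mem_cons_of_mem _ h)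
      simp only [List.map_cons, List.sum_cons, List.countP_cons, hki, if_false, ih hk']
      by_cases h : p i <;> simp [h] <;> push_cast <;> ring

lemma sum_contrib (F : Nat → Int) (p : Nat → Bool) (k : Nat) :
    ∀ is : List Nat, is.Nodup → k ∈ is →
      (is.map (fun i => (if k = i then F i else 0) + (if p i then (1 : Int) else 0))).sum
        = F k + (is.countP p : Int) := by
  intro is
  induction is with
  | nil => intro _ hk; simp at hk
  | cons i is ih =>
      intro hnd hk
      rcases List.nodup_cons.mp hnd with ⟨hni, hnd'⟩
      simp only [List.map_cons, List.sum_cons, List.countP_cons]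
      rcases List.mem_cons.mp hk with hk | hk
      · subst hk
        rw [sum_if_zero F p k is hni]
        by_cases h : p k <;> simp [h] <;> push_cast <;> ring
      · have hki : k ≠ i := fun h => hni (h ▸ hk)
        rw [ih hnd' hk]
        simp only [hki, if_false]
        by_cases h : p i <;> simp [h] <;> push_cast <;> ring

lemma sum_contrib_range (matrix : List (List Int)) (n k : Nat) (hk : k < n) :
    ((List.range n).map (fun i => pvContrib matrix n i k)).sum
      = ((List.range n).countP (pvBit matrix k) : Int)
        + ((List.range n).countP (fun i => pvBit matrix i k) : Int) := by
  have hmem : k ∈ List.range n := List.mem_range.mpr hk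
  have hnd : (List.range n).Nodup := List.nodup_range
  have heq : ∀ i ∈ List.range n,
      pvContrib matrix n i k
        = (if k = i then (((List.range n).countP (pvBit matrix i) : Int)) else 0)
          + (if pvBit matrix i k then (1 : Int) else 0) := by
    intro i _
    unfold pvContrib
    rw [countP_eq_indicator (pvBit matrix i) (List.range n) k hnd hmem]
    by_cases h : pvBit matrix i k <;> simp [h]
  rw [List.map_congr_left heq,
      sum_contrib (fun i => ((List.range n).countP (pvBit matrix i) : Int))
        (fun i => pvBit matrix i k) k (List.range n) hnd hmem]

theorem main_equiv (matrix : List (List Int)) :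
    adjacency_matrix_to_adjacency_lists_and_degree matrix
      = adjacency_matrix_to_adjacency_lists_and_degree_alt matrix := by
  unfold adjacency_matrix_to_adjacency_lists_and_degree adjacency_matrix_to_adjacency_lists_and_degree_alt
  set n := matrix.length with hn
  rw [outer_split]
  refine Prod.ext ?_ ?_
  · -- adjacency lists
    apply List.ext_getElem?
    intro k
    have h1 : (fun al i => (List.range n).foldl (pvStepAL matrix i) al)
        = (fun (al : List (List Int)) i => al.modify i (fun l => l ++ pvRowls matrix n i)) := by
      funext al i; exact inner_al matrix i (List.range n) al
    rw [h1, outer_al_getElem? matrix n (List.range n) List.nodup_range]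
    by_cases hk : k < n
    · simp only [List.mem_range.mpr hk, if_true, List.getElem?_map, List.getElem?_range hk,
        Option.map_some, Option.map]
      rfl
    · have h2 : ((List.range n).map (fun _ => ([] : List Int)))[k]? = none :=
        List.getElem?_eq_none (by simpa using Nat.le_of_not_lt hk)
      have h3 : (List.range n)[k]? = none :=
        List.getElem?_eq_none (by simpa using Nat.le_of_not_lt hk)
      simp [List.mem_range, hk, h2, List.getElem?_map, h3]
  · -- degrees
    apply List.ext_getElem?
    intro k
    rw [outer_dg_getElem? matrix n (List.range n)]
    by_cases hk : k < n
    · rw [sum_contrib_range matrix n k hk]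
      simp only [List.getElem?_replicate, hk, if_true, Option.map_some, List.getElem?_map,
        List.getElem?_range, hk, Option.map]
      congr 1
      have hget : ((List.range n).map (fun i =>
          ((List.range n).filter (fun j => (matrix.getD i []).getD j 0 == 1)).map
            (fun j => Int.ofNat j))).getD k []
          = ((List.range n).filter (fun j => (matrix.getD k []).getD j 0 == 1)).map
              (fun j => Int.ofNat j) := by
        rw [List.getD_eq_getElem?_getD, List.getElem?_map, List.getElem?_range hk]
        rfl
      rw [hget]
      have hb : pvBit matrix k = fun j => (matrix.getD k []).getD j 0 == 1 := rfl
      have hb2 : (fun i => pvBit matrix i k) = (fun i => (matrix.getD i []).getD k 0 == 1) := rfl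
      simp only [List.length_map, hb, hb2, List.countP_eq_length_filter]
      ring
    · have h3 : (List.range n)[k]? = none :=
        List.getElem?_eq_none (by simpa using Nat.le_of_not_lt hk)
      simp [List.getElem?_replicate, hk, List.getElem?_map, h3]

-- ===== VERDICT (by name: the statement is the Claim_ definition above) =====
theorem adjacency_matrix_to_adjacency_lists_and_degree_spec : Claim_equal_adjacency_matrix_to_adjacency_lists_and_degree := by
  intro matrix _ _
  unfold Spec_adjacency_matrix_to_adjacency_lists_and_degree
  exact main_equiv matrix
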